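-- pv_equiv track=rewrite | github.com/causal-iq/discovery | experiments/impact_analysis.py | series_comparable
-- ===== SOURCE A (Python) =====
-- def series_comparable(required, props1, props2):
--     """
--         Decide whether two series are comparable based upon their properties.
--         To be comparable the series must have the values specified in the
--         "required" argument for each series, and all other values must be the
--         same in the two series.
--
--         :param dict required: {idx: (val1, val2)} index position and value
--                               required in each series
--         :param tuple props1: properties of the first series
--         :param tuple props2: properties of the second series
--
--         :raises TypeError: if arguments have bad types
--         :raises ValueError: if arguments have wrong sizes
--
--         :returns bool: True if series are comparable, otherwise False
--     """
--     if (not isinstance(required, dict) or not isinstance(props1, tuple)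
--             or not isinstance(props2, tuple)
--             or not all([isinstance(i, int) for i in required.keys()])
--             or not all([isinstance(v, tuple) for v in required.values()])):
--         raise TypeError('series_comparable: bad arg type')
--
--     if (not len(required) or not len(props1) or len(props1) != len(props2)
--             or any([len(v) != 2 for v in required.values()])
--             or any([i < 0 or i > len(props1) - 1 for i in required.keys()])):
--         raise ValueError('series_comparable: bad arg sizes/values')
--
--     for i in range(len(props1)):
--         if i in required:
--             if props1[i] != required[i][0] or props2[i] != required[i][1]:
--                 return False
--         elif props1[i] != props2[i]:
--             return False
--     return True
-- ===== SOURCE B (Python) =====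
-- def series_comparable(required, props1, props2):
--     if (not isinstance(required, dict) or not isinstance(props1, tuple)
--             or not isinstance(props2, tuple)
--             or not all([isinstance(i, int) for i in required.keys()])
--             or not all([isinstance(v, tuple) for v in required.values()])):
--         raise TypeError('series_comparable: bad arg type')
--
--     if (not len(required) or not len(props1) or len(props1) != len(props2)
--             or any([len(v) != 2 for v in required.values()])
--             or any([i < 0 or i > len(props1) - 1 for i in required.keys()])):
--         raise ValueError('series_comparable: bad arg sizes/values')
--
--     # Build the two series each side WOULD have to equal: take the other series
--     # and overlay the required values, then compare wholesale.
--     expect1 = list(props2)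
--     expect2 = list(props1)
--     for i, (v1, v2) in required.items():
--         expect1[i] = v1
--         expect2[i] = v2
--     return list(props1) == expect1 and list(props2) == expect2
-- ===== Notes on version B (the rewrite author's own statement) =====
-- stated objective: alternative
-- what changed: Instead of scanning indices and branching on dict membership, B constructs the two expected series (each the other series with the required values overlaid by assignment) and decides comparability by two whole-list equality comparisons; the validation prologue is kept verbatim to preserve the exact exceptions.
import Mathlib
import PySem

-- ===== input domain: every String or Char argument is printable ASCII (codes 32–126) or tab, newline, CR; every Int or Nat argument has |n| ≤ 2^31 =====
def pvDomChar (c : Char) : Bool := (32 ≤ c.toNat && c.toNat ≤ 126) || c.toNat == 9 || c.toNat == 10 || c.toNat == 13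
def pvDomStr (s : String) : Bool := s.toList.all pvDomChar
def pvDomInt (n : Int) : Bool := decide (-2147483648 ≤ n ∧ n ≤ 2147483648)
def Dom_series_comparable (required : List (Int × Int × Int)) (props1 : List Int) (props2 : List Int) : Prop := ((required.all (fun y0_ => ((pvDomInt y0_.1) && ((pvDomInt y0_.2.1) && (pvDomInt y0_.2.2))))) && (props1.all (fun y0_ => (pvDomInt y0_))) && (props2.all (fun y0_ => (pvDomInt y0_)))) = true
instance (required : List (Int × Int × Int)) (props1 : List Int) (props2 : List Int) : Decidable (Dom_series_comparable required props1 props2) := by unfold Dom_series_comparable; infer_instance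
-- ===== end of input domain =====

-- B builds the two expected series (the other series with the required values overlaid by
-- assignment) and compares wholesale, instead of A's per-index scan branching on dict membership.


-- ===== PORT A =====
-- A raises TypeError/ValueError on bad types/sizes; in the typed Lean domain only the
-- size/range checks remain and those inputs are excluded by Pre_ below; the loop is ported here.
def series_comparable (required : List (Int × Int × Int)) (props1 : List Int) (props2 : List Int) : Bool :=
  let d : PySem.Dict Int (Int × Int) := PySem.Dict.ofList required
  (List.range props1.length).all (fun i =>
    match d.get? (i : Int) with
    | some v => (PySem.List.pyGetD props1 (i : Int) 0 == v.1)
                  && (PySem.List.pyGetD props2 (i : Int) 0 == v.2)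
    | none => PySem.List.pyGetD props1 (i : Int) 0 == PySem.List.pyGetD props2 (i : Int) 0)

-- ===== PORT B =====
-- Python list assignment xs[i] = v; exact for -len ≤ i < len (Pre_ guarantees 0 ≤ i < len);
-- Python raises IndexError outside that range, which Pre_ excludes.
def pyAssign (xs : List Int) (i : Int) (v : Int) : List Int :=
  let j := if i < 0 then i + xs.length else i
  xs.set j.toNat v

-- B: overlay the required values on a copy of the other series, then compare wholesale.
def series_comparable_alt (required : List (Int × Int × Int)) (props1 : List Int) (props2 : List Int) : Bool :=
  let d : PySem.Dict Int (Int × Int) := PySem.Dict.ofList required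
  let expect1 := d.items.foldl (fun acc kv => pyAssign acc kv.1 kv.2.1) props2
  let expect2 := d.items.foldl (fun acc kv => pyAssign acc kv.1 kv.2.2) props1
  (props1 == expect1) && (props2 == expect2)

-- ===== PRECONDITION & SPEC =====
-- Pre_ excludes exactly the inputs on which A raises ValueError: empty required, empty
-- props1, unequal lengths, or a required index out of range 0..len(props1)-1.
def Pre_series_comparable (required : List (Int × Int × Int)) (props1 : List Int) (props2 : List Int) : Prop :=
  required ≠ [] ∧ props1 ≠ [] ∧ props1.length = props2.length ∧
  ∀ t ∈ required, 0 ≤ t.1 ∧ t.1 ≤ (props1.length : Int) - 1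
instance (required : List (Int × Int × Int)) (props1 : List Int) (props2 : List Int) : Decidable (Pre_series_comparable required props1 props2) := by unfold Pre_series_comparable; infer_instance
def pvWitness_series_comparable : (List (Int × Int × Int)) × List Int × List Int := ([(0, 1, 2)], [1, 5], [2, 5])

def Spec_series_comparable (required : List (Int × Int × Int)) (props1 : List Int) (props2 : List Int) (out : Bool) : Prop := out = series_comparable_alt required props1 props2
instance (required : List (Int × Int × Int)) (props1 : List Int) (props2 : List Int) (out : Bool) : Decidable (Spec_series_comparable required props1 props2 out) := by unfold Spec_series_comparable; infer_instance

-- ===== CLAIM (what is proved, stated in full; the proofs are below) =====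
def Claim_equal_series_comparable : Prop := ∀ (required : List (Int × Int × Int)) (props1 : List Int) (props2 : List Int), Dom_series_comparable required props1 props2 → Pre_series_comparable required props1 props2 → Spec_series_comparable required props1 props2 (series_comparable required props1 props2)

-- ===== LEMMAS AND PROOFS =====
theorem keys_ofList_sub {required : List (Int × Int × Int)} :
    ∀ k ∈ (PySem.Dict.ofList required).keys, ∃ t ∈ required, t.1 = k := by
  intro k hk
  have : (PySem.Dict.ofList required).keys
      = PySem.Set.update PySem.Dict.empty.keys (required.map (·.1)) :=
    PySem.Dict.keys_foldl_insert_key required (·.1) (fun _ t => t.2) PySem.Dict.empty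
  rw [this] at hk
  have hk2 : k ∈ PySem.Set.ofList (required.map (·.1)) := hk
  have hk' : k ∈ required.map (·.1) := (PySem.Set.mem_ofList (required.map (·.1)) k).mp hk2
  obtain ⟨t, ht, hteq⟩ := List.mem_map.mp hk'
  exact ⟨t, ht, hteq⟩

theorem pyAssign_length (xs : List Int) (i : Int) (v : Int) :
    (pyAssign xs i v).length = xs.length := by
  simp [pyAssign]

theorem foldl_assign_length (its : List (Int × Int × Int)) (f : Int × Int × Int → Int)
    (base : List Int) :
    (its.foldl (fun acc kv => pyAssign acc kv.1 (f kv)) base).length = base.length := by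
  induction its generalizing base with
  | nil => rfl
  | cons kv rest ih => simp [List.foldl_cons, ih, pyAssign_length]

-- value at index j of the overlay loop: the (unique) item with key j, else the base value
theorem foldl_assign_getElem (its : List (Int × Int × Int)) (f : Int × Int × Int → Int)
    (base : List Int) (hnd : (its.map (·.1)).Nodup)
    (hbnd : ∀ kv ∈ its, 0 ≤ kv.1 ∧ kv.1 < (base.length : Int))
    (j : Nat) (hj : j < base.length)
    (hj' : j < (its.foldl (fun acc kv => pyAssign acc kv.1 (f kv)) base).length) :
    (its.foldl (fun acc kv => pyAssign acc kv.1 (f kv)) base)[j] =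
      match its.find? (fun kv => kv.1 == (j : Int)) with
      | some kv => f kv
      | none => base[j] := by
  induction its generalizing base with
  | nil => simp
  | cons kv rest ih =>
    simp only [List.foldl_cons]
    have hlen : (pyAssign base kv.1 (f kv)).length = base.length := pyAssign_length ..
    have hnd' : (rest.map (·.1)).Nodup := (List.nodup_cons.mp hnd).2
    have hnotin : kv.1 ∉ rest.map (·.1) := (List.nodup_cons.mp hnd).1
    have hbnd' : ∀ p ∈ rest, 0 ≤ p.1 ∧ p.1 < ((pyAssign base kv.1 (f kv)).length : Int) := by
      intro p hp; rw [hlen]; exact hbnd p (List.mem_cons_of_mem kv hp)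
    have hj2 : j < (pyAssign base kv.1 (f kv)).length := by omega
    have hrec := ih (pyAssign base kv.1 (f kv)) hnd' hbnd' hj2 (by
      rw [foldl_assign_length, hlen]; exact hj)
    rw [hrec]
    have hb := hbnd kv (List.mem_cons_self)
    have hnonneg : ¬ kv.1 < 0 := by omega
    have hkey : (pyAssign base kv.1 (f kv))[j]'hj2 = if kv.1 = (j : Int) then f kv else base[j] := by
      have hjx : j < (base.set (if kv.1 < 0 then kv.1 + base.length else kv.1).toNat (f kv)).length := by
        simpa [pyAssign] using hj2
      simp only [pyAssign]
      rw [List.getElem_set]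
      by_cases hk : kv.1 = (j : Int)
      · rw [if_pos hk, if_pos (by omega)]
      · rw [if_neg hk, if_neg (by omega)]
    by_cases hk : kv.1 = (j : Int)
    · -- head key is j: no item in rest has key j, so the head's value survives
      have hfind : rest.find? (fun p => p.1 == (j : Int)) = none := by
        rw [List.find?_eq_none]
        intro p hp hb
        have hpj : p.1 = (j : Int) := by simpa using hb
        exact hnotin (hk ▸ hpj ▸ List.mem_map_of_mem hp)
      rw [List.find?_cons_of_pos (by simpa using hk), hfind]
      simpa using hkey.trans (if_pos hk)
    · -- head key ≠ j: the head assignment does not touch index j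
      rw [List.find?_cons_of_neg (by simpa using hk)]
      cases hfind : rest.find? (fun p => p.1 == (j : Int)) with
      | some p => rfl
      | none => simpa using hkey.trans (if_neg hk)

theorem main_equiv (required : List (Int × Int × Int)) (props1 props2 : List Int)
    (hpre : Pre_series_comparable required props1 props2) :
    series_comparable required props1 props2 = series_comparable_alt required props1 props2 := by
  obtain ⟨hreq, hp1, hlen, hrange⟩ := hpre
  unfold series_comparable series_comparable_alt
  set d := PySem.Dict.ofList required with hd
  have hnd : d.keys.Nodup := PySem.Dict.nodup_keys_ofList required
  have hndm : (d.items.map (·.1)).Nodup := by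
    simpa only [PySem.Dict.keys] using hnd
  have hbnd1 : ∀ kv ∈ d.items, 0 ≤ kv.1 ∧ kv.1 < (props1.length : Int) := by
    intro kv hkv
    have hk : kv.1 ∈ d.keys := PySem.Dict.mem_keys_of_mem_items d hkv
    obtain ⟨t, ht, hteq⟩ := keys_ofList_sub kv.1 hk
    have := hrange t ht
    omega
  have hbnd2 : ∀ kv ∈ d.items, 0 ≤ kv.1 ∧ kv.1 < (props2.length : Int) := by
    intro kv hkv; have := hbnd1 kv hkv; omega
  have hlen1 : (d.items.foldl (fun acc kv => pyAssign acc kv.1 kv.2.1) props2).length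
      = props2.length := foldl_assign_length ..
  have hlen2 : (d.items.foldl (fun acc kv => pyAssign acc kv.1 kv.2.2) props1).length
      = props1.length := foldl_assign_length ..
  -- relate find? on items with d.get?
  have hfind : ∀ j : Nat, d.items.find? (fun kv => kv.1 == (j : Int)) =
      (d.get? (j : Int)).map (fun v => ((j : Int), v)) := by
    intro j
    cases hg : d.get? (j : Int) with
    | none =>
      refine Eq.trans (List.find?_eq_none.mpr ?_) rfl
      intro p hp hb
      have hpj : p.1 = (j : Int) := by simpa using hb
      have : d.get? p.1 = some p.2 := PySem.Dict.get?_of_mem_items d (by simpa using hp) hnd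
      rw [hpj, hg] at this; simp at this
    | some v =>
      have hmem : ((j : Int), v) ∈ d.items := PySem.Dict.mem_items_of_get?_eq_some d hg
      cases hf : d.items.find? (fun kv => kv.1 == (j : Int)) with
      | none =>
        have := List.find?_eq_none.mp hf _ hmem
        simp at this
      | some p =>
        obtain ⟨pk, pv⟩ := p
        have hpj : pk = (j : Int) := by
          have := List.find?_some hf
          simpa using this
        have hpm := List.mem_of_find?_eq_some hf
        have hpg : d.get? pk = some pv := PySem.Dict.get?_of_mem_items d hpm hnd
        rw [hpj, hg] at hpg
        simp_all
  rw [Bool.eq_iff_iff]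
  simp only [List.all_eq_true, List.mem_range, Bool.and_eq_true, beq_iff_eq]
  constructor
  · intro h
    constructor
    · apply List.ext_getElem (by omega)
      intro j hj1 hj2
      have hj2' : j < props2.length := by omega
      have g1 : PySem.List.pyGetD props1 ((j : Nat) : Int) 0 = props1[j] := by simp [hj1]
      have g2 : PySem.List.pyGetD props2 ((j : Nat) : Int) 0 = props2[j]'hj2' := by simp [hj2']
      have hthis := h j hj1
      rw [foldl_assign_getElem d.items (fun kv => kv.2.1) props2 hndm hbnd2 j hj2' hj2,
        hfind j]
      cases hg : d.get? (j : Int) with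
      | some v =>
        rw [hg] at hthis
        simp only [g1, g2, Bool.and_eq_true, beq_iff_eq] at hthis
        simp only [Option.map_some]
        exact hthis.1
      | none =>
        rw [hg] at hthis
        simp only [g1, g2, beq_iff_eq] at hthis
        simp only [Option.map_none]
        exact hthis
    · apply List.ext_getElem (by omega)
      intro j hj1 hj2
      have hjl : j < props1.length := by omega
      have g1 : PySem.List.pyGetD props1 ((j : Nat) : Int) 0 = props1[j]'hjl := by simp [hjl]
      have g2 : PySem.List.pyGetD props2 ((j : Nat) : Int) 0 = props2[j]'hj1 := by simp [hj1]
      have hthis := h j hjl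
      rw [foldl_assign_getElem d.items (fun kv => kv.2.2) props1 hndm hbnd1 j hjl hj2,
        hfind j]
      cases hg : d.get? (j : Int) with
      | some v =>
        rw [hg] at hthis
        simp only [g1, g2, Bool.and_eq_true, beq_iff_eq] at hthis
        simp only [Option.map_some]
        exact hthis.2
      | none =>
        rw [hg] at hthis
        simp only [g1, g2, beq_iff_eq] at hthis
        simp only [Option.map_none]
        exact hthis.symm
  · rintro ⟨he1, he2⟩ i hi
    have hi2 : i < props2.length := by omega
    have g1 : PySem.List.pyGetD props1 ((i : Nat) : Int) 0 = props1[i] := by simp [hi]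
    have g2 : PySem.List.pyGetD props2 ((i : Nat) : Int) 0 = props2[i]'hi2 := by simp [hi2]
    have h1 : props1[i] = (d.items.foldl (fun acc kv => pyAssign acc kv.1 kv.2.1) props2)[i]'(by rw [hlen1]; omega) :=
      List.getElem_of_eq he1 hi
    have h2 : props2[i] = (d.items.foldl (fun acc kv => pyAssign acc kv.1 kv.2.2) props1)[i]'(by rw [hlen2]; omega) :=
      List.getElem_of_eq he2 hi2
    rw [foldl_assign_getElem d.items (fun kv => kv.2.1) props2 hndm hbnd2 i hi2 (by rw [hlen1]; omega),
      hfind i] at h1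
    rw [foldl_assign_getElem d.items (fun kv => kv.2.2) props1 hndm hbnd1 i hi (by rw [hlen2]; omega),
      hfind i] at h2
    cases hg : d.get? (i : Int) with
    | some v =>
      rw [hg] at h1 h2
      simp only [Option.map_some] at h1 h2
      simp only [g1, g2, Bool.and_eq_true, beq_iff_eq]
      exact ⟨h1, h2⟩
    | none =>
      rw [hg] at h1 h2
      simp only [Option.map_none] at h1 h2
      simp only [g1, g2, beq_iff_eq]
      exact h1

-- ===== VERDICT (by name: the statement is the Claim_ definition above) =====
theorem series_comparable_spec : Claim_equal_series_comparable := by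
  intro required props1 props2 _ hpre
  exact main_equiv required props1 props2 hpre
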